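-- pv_equiv track=rewrite | github.com/chong-z/TextAttack | textattack/transformations/word_swap_change_number.py | cluster_idx
-- ===== SOURCE A (Python) =====
-- def cluster_idx(idx_ls):
--     """Given a list of idx, return a list that contains sub-lists of adjacent
--     idx."""
--
--     if len(idx_ls) < 2:
--         return [[i] for i in idx_ls]
--     else:
--         output = [[idx_ls[0]]]
--         prev = idx_ls[0]
--         list_pos = 0
--
--         for idx in idx_ls[1:]:
--             if idx - 1 == prev:
--                 output[list_pos].append(idx)
--             else:
--                 output.append([idx])
--                 list_pos += 1
--             prev = idx
--         return output
-- ===== SOURCE B (Python) =====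
-- def cluster_idx(idx_ls):
--     """Given a list of idx, return a list that contains sub-lists of adjacent
--     idx."""
--     n = len(idx_ls)
--     if n == 0:
--         return []
--     cuts = [0] + [k + 1 for k, (u, v) in enumerate(zip(idx_ls, idx_ls[1:])) if v != u + 1] + [n]
--     return [idx_ls[a:b] for a, b in zip(cuts, cuts[1:])]
-- ===== Notes on version B (the rewrite author's own statement) =====
-- stated objective: alternative
-- what changed: Replaces the single-pass prev/list_pos accumulator loop by two staged passes: first compute the list of break positions (cut indices where adjacency fails), then slice the input between each pair of adjacent cuts.
import Mathlib
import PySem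

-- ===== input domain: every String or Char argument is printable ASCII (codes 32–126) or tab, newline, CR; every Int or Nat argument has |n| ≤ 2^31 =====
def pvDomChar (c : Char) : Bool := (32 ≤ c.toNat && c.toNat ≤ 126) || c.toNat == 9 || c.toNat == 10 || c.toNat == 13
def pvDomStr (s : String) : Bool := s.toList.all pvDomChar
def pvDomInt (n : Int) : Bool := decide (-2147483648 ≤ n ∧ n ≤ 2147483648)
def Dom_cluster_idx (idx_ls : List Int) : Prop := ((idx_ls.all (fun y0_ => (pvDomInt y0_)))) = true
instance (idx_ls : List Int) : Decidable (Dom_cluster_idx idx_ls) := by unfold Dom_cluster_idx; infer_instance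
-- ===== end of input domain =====

-- B is a two-stage reformulation (compute break positions, then slice between adjacent cuts); no speed claim.

-- ===== PORT A =====
-- output[list_pos].append(idx): append v to the sub-list at position pos
def clusterAppendAt : List (List Int) → Nat → Int → List (List Int)
  | [], _, _ => []
  | g :: gs, 0, v => (g ++ [v]) :: gs
  | g :: gs, n + 1, v => g :: clusterAppendAt gs n v

-- the 'for idx in idx_ls[1:]' loop, state = (output, prev, list_pos)
def clusterLoopA : List Int → List (List Int) → Int → Nat → List (List Int)
  | [], out, _, _ => out
  | idx :: rest, out, prev, pos =>
    if idx - 1 = prev then clusterLoopA rest (clusterAppendAt out pos idx) idx pos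
    else clusterLoopA rest (out ++ [[idx]]) idx (pos + 1)

def cluster_idx (idx_ls : List Int) : List (List Int) :=
  if idx_ls.length < 2 then idx_ls.map (fun i => [i])
  else
    match idx_ls with
    | [] => []
    | x :: rest => clusterLoopA rest [[x]] x 0

-- ===== PORT B =====
-- stage 1 of Source B: cuts = [0] + [k+1 for k,(u,v) in enumerate(zip(idx_ls, idx_ls[1:])) if v != u+1] + [n]
-- stage 2: [idx_ls[a:b] for a,b in zip(cuts, cuts[1:])]
def cluster_idx_alt (idx_ls : List Int) : List (List Int) :=
  let n : Int := idx_ls.length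
  if idx_ls.length = 0 then []
  else
    let cuts : List Int :=
      [0] ++
        ((PySem.List.enumerate (idx_ls.zip (PySem.List.slice idx_ls (some 1) none)) 0).filterMap
          (fun kuv => if kuv.2.2 ≠ kuv.2.1 + 1 then some (kuv.1 + 1) else none)) ++
        [n]
    (cuts.zip (PySem.List.slice cuts (some 1) none)).map
      (fun ab => PySem.List.slice idx_ls (some ab.1) (some ab.2))

-- ===== PRECONDITION & SPEC =====
def Spec_cluster_idx (idx_ls : List Int) (out : List (List Int)) : Prop := out = cluster_idx_alt idx_ls
instance (idx_ls : List Int) (out : List (List Int)) : Decidable (Spec_cluster_idx idx_ls out) := by unfold Spec_cluster_idx; infer_instance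

-- ===== CLAIM (what is proved, stated in full; the proofs are below) =====
def Claim_equal_cluster_idx : Prop := ∀ (idx_ls : List Int), Dom_cluster_idx idx_ls → Spec_cluster_idx idx_ls (cluster_idx idx_ls)

-- ===== LEMMAS AND PROOFS =====

-- reference shape: given the previous value, (extension of the current run, remaining groups)
def clusterCont : Int → List Int → List Int × List (List Int)
  | _, [] => ([], [])
  | prev, idx :: rest =>
    let egs := clusterCont idx rest
    if idx - 1 = prev then (idx :: egs.1, egs.2) else ([], (idx :: egs.1) :: egs.2)

theorem clusterAppendAt_last (out : List (List Int)) (g : List Int) (v : Int) :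
    clusterAppendAt (out ++ [g]) out.length v = out ++ [g ++ [v]] := by
  induction out with
  | nil => simp [clusterAppendAt]
  | cons h t ih => simpa [clusterAppendAt] using ih

theorem clusterLoopA_eq (rest : List Int) :
    ∀ (out : List (List Int)) (g : List Int) (prev : Int),
      clusterLoopA rest (out ++ [g]) prev out.length
        = (out ++ [g ++ (clusterCont prev rest).1]) ++ (clusterCont prev rest).2 := by
  induction rest with
  | nil => intro out g prev; simp [clusterLoopA, clusterCont]
  | cons idx rest ih =>
    intro out g prev
    simp only [clusterLoopA, clusterCont]
    by_cases h : idx - 1 = prev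
    · simp only [h, clusterAppendAt_last]
      simpa using ih out (g ++ [idx]) idx
    · simp only [if_neg h]
      have : out ++ [g] ++ [[idx]] = (out ++ [g]) ++ [[idx]] := by simp
      rw [this]
      have hlen : (out ++ [g]).length = out.length + 1 := by simp
      rw [← hlen]
      simpa using ih (out ++ [g]) [idx] idx

-- B-side abbreviations used only by the proofs
def clusterInner (s : Int) (l : List Int) : List Int :=
  (PySem.List.enumerate (l.zip l.tail) s).filterMap
    (fun kuv => if kuv.2.2 ≠ kuv.2.1 + 1 then some (kuv.1 + 1) else none)

def clusterTailCuts (s : Int) (l : List Int) : List Int :=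
  clusterInner s l ++ [s + (l.length : Int)]

def clusterSliceAdj (l : List Int) (cs : List Int) : List (List Int) :=
  (cs.zip cs.tail).map (fun ab => PySem.List.slice l (some ab.1) (some ab.2))

theorem sliceAdj_cons (l : List Int) (a b : Int) (cs : List Int) :
    clusterSliceAdj l (a :: b :: cs) = PySem.List.slice l (some a) (some b) :: clusterSliceAdj l (b :: cs) := by
  simp [clusterSliceAdj]

theorem slice_shift (x : Int) (l : List Int) (a b : Int) (ha : 0 ≤ a) (hb : 0 ≤ b) :
    PySem.List.slice (x :: l) (some (a + 1)) (some (b + 1)) = PySem.List.slice l (some a) (some b) := by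
  have h1 : (a + 1).toNat = a.toNat + 1 := by omega
  have h2 : (b + 1).toNat = b.toNat + 1 := by omega
  rw [PySem.List.slice_toNat, PySem.List.slice_toNat]
  all_goals first | omega | simp [h1, h2]

theorem slice_zero_succ (x : Int) (l : List Int) (b : Int) (hb : 0 ≤ b) :
    PySem.List.slice (x :: l) (some 0) (some (b + 1)) = x :: PySem.List.slice l (some 0) (some b) := by
  have h2 : (b + 1).toNat = b.toNat + 1 := by omega
  rw [PySem.List.slice_toNat, PySem.List.slice_toNat]
  all_goals first | omega | simp [h2]

theorem sliceAdj_shift (x : Int) (l : List Int) (cs : List Int)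
    (h : ∀ c ∈ cs, 0 ≤ c) :
    clusterSliceAdj (x :: l) (cs.map (· + 1)) = clusterSliceAdj l cs := by
  unfold clusterSliceAdj
  have ht : (cs.map (· + 1)).tail = cs.tail.map (· + 1) := by
    cases cs <;> simp
  rw [ht, List.zip_map]
  rw [List.map_map]
  apply List.map_congr_left
  intro ab hab
  have h1 : ab.1 ∈ cs := (List.of_mem_zip hab).1
  have h2 : ab.2 ∈ cs.tail := (List.of_mem_zip hab).2
  exact slice_shift x l ab.1 ab.2 (h _ h1) (h _ (List.mem_of_mem_tail h2))

theorem enumerate_shift {α : Type} (xs : List α) (s : Int) :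
    PySem.List.enumerate xs (s + 1) = (PySem.List.enumerate xs s).map (fun p => (p.1 + 1, p.2)) := by
  induction xs generalizing s with
  | nil => simp [PySem.List.enumerate_nil]
  | cons x xs ih =>
    rw [PySem.List.enumerate_cons, PySem.List.enumerate_cons, ih (s + 1)]
    simp [add_right_comm]

theorem clusterInner_shift (l : List Int) (s : Int) :
    clusterInner (s + 1) l = (clusterInner s l).map (· + 1) := by
  unfold clusterInner
  rw [enumerate_shift, List.filterMap_map, List.map_filterMap]
  congr 1
  funext p
  by_cases h : p.2.2 = p.2.1 + 1 <;> simp [h]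

theorem clusterTailCuts_shift (l : List Int) (s : Int) :
    clusterTailCuts (s + 1) l = (clusterTailCuts s l).map (· + 1) := by
  unfold clusterTailCuts
  rw [clusterInner_shift]
  simp [add_right_comm]

theorem clusterInner_cons₂ (s x y : Int) (ys : List Int) :
    clusterInner s (x :: y :: ys)
      = (if y ≠ x + 1 then [s + 1] else []) ++ clusterInner (s + 1) (y :: ys) := by
  unfold clusterInner
  simp only [List.tail_cons, List.zip_cons_cons, PySem.List.enumerate_cons, List.filterMap_cons]
  by_cases h : y ≠ x + 1
  · simp [if_pos h]
  · simp [if_neg h]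

theorem clusterInner_lt (l : List Int) : ∀ (s c : Int), c ∈ clusterInner s l → s < c := by
  induction l with
  | nil => intro s c hc; simp [clusterInner, PySem.List.enumerate_nil] at hc
  | cons x xs ih =>
    intro s c hc
    cases xs with
    | nil => simp [clusterInner, PySem.List.enumerate_nil] at hc
    | cons y ys =>
      rw [clusterInner_cons₂] at hc
      rcases List.mem_append.mp hc with h | h
      · by_cases hy : y ≠ x + 1
        · simp [if_pos hy] at h; omega
        · simp [if_neg hy] at h
      · have := ih (s + 1) c h
        omega

theorem clusterTailCuts_nonneg (l : List Int) (s : Int) (hs : 0 ≤ s) :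
    ∀ c ∈ clusterTailCuts s l, 0 ≤ c := by
  intro c hc
  unfold clusterTailCuts at hc
  rcases List.mem_append.mp hc with h | h
  · have := clusterInner_lt l s c h
    omega
  · simp at h
    have : (0:Int) ≤ (l.length : Int) := by positivity
    omega

theorem clusterTailCuts_cons₂ (s x y : Int) (ys : List Int) :
    clusterTailCuts s (x :: y :: ys)
      = (if y ≠ x + 1 then [s + 1] else []) ++ clusterTailCuts (s + 1) (y :: ys) := by
  unfold clusterTailCuts
  rw [clusterInner_cons₂]
  have : s + ((x :: y :: ys).length : Int) = (s + 1) + ((y :: ys).length : Int) := by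
    simp; ring
  rw [this]
  simp

theorem clusterTailCuts_ne_nil (s : Int) (l : List Int) : clusterTailCuts s l ≠ [] := by
  unfold clusterTailCuts
  simp

-- characterisation of B's slicing on a nonempty list
theorem clusterB_char (xs : List Int) :
    ∀ (x : Int),
      clusterSliceAdj (x :: xs) ((0 : Int) :: clusterTailCuts 0 (x :: xs))
        = (x :: (clusterCont x xs).1) :: (clusterCont x xs).2 := by
  induction xs with
  | nil =>
    intro x
    have : clusterTailCuts 0 [x] = [1] := by
      unfold clusterTailCuts clusterInner
      simp [PySem.List.enumerate_nil]
    rw [this, sliceAdj_cons]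
    have : PySem.List.slice [x] (some 0) (some 1) = [x] := by
      rw [PySem.List.slice_toNat]
      all_goals first | omega | simp
    simp [this, clusterSliceAdj, clusterCont]
  | cons y ys ih =>
    intro x
    obtain ⟨i0, I', hT⟩ : ∃ i0 I', clusterTailCuts 0 (y :: ys) = i0 :: I' := by
      cases h : clusterTailCuts 0 (y :: ys) with
      | nil => exact absurd h (clusterTailCuts_ne_nil 0 (y :: ys))
      | cons a b => exact ⟨a, b, rfl⟩
    have hTnn := clusterTailCuts_nonneg (y :: ys) 0 le_rfl
    rw [hT] at hTnn
    have hIH := ih y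
    rw [hT, sliceAdj_cons] at hIH
    have hslice : PySem.List.slice (y :: ys) (some 0) (some i0) = y :: (clusterCont y ys).1 :=
      (List.cons.injEq _ _ _ _ ▸ hIH).1
    have hrest : clusterSliceAdj (y :: ys) (i0 :: I') = (clusterCont y ys).2 :=
      (List.cons.injEq _ _ _ _ ▸ hIH).2
    have hcuts := clusterTailCuts_cons₂ 0 x y ys
    rw [clusterTailCuts_shift (y :: ys) 0, hT] at hcuts
    by_cases h : y - 1 = x
    · have hne : ¬ (y ≠ x + 1) := by omega
      rw [hcuts, if_neg hne]
      simp only [List.nil_append, List.map_cons]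
      rw [sliceAdj_cons]
      have hsh : clusterSliceAdj (x :: y :: ys) (List.map (· + 1) (i0 :: I'))
          = clusterSliceAdj (y :: ys) (i0 :: I') := by
        apply sliceAdj_shift
        exact hTnn
      simp only [List.map_cons] at hsh
      rw [hsh, hrest]
      rw [slice_zero_succ _ _ _ (hTnn i0 (by simp)), hslice]
      simp only [clusterCont, if_pos h]
    · have hne : (y ≠ x + 1) := by omega
      rw [hcuts, if_pos hne]
      simp only [zero_add]
      have hmap : (1 : Int) :: List.map (· + 1) (i0 :: I') = List.map (· + 1) ((0 : Int) :: i0 :: I') := by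
        simp
      simp only [List.cons_append, List.nil_append]
      rw [sliceAdj_cons, hmap]
      rw [sliceAdj_shift x (y :: ys) _ (by
        intro c hc
        rcases List.mem_cons.mp hc with rfl | hc
        · exact le_rfl
        · exact hTnn c hc)]
      have hihy := ih y
      rw [hT] at hihy
      rw [hihy]
      have hx : PySem.List.slice (x :: y :: ys) (some 0) (some 1) = [x] := by
        rw [PySem.List.slice_toNat]
        all_goals first | omega | simp
      rw [hx]
      simp [clusterCont, h]

-- B on a nonempty list equals the reference shape
theorem cluster_alt_cons (x : Int) (xs : List Int) :
    cluster_idx_alt (x :: xs) = (x :: (clusterCont x xs).1) :: (clusterCont x xs).2 := by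
  have h := clusterB_char xs x
  unfold cluster_idx_alt
  simp only [List.length_cons, Nat.succ_ne_zero, if_neg (Nat.succ_ne_zero xs.length)]
  rw [PySem.List.slice_from_one, PySem.List.slice_from_one]
  unfold clusterSliceAdj clusterTailCuts clusterInner at h
  simp only [List.tail_cons] at h ⊢
  convert h using 3 <;> simp

-- ===== VERDICT (by name: the statement is the Claim_ definition above) =====
theorem cluster_idx_spec : Claim_equal_cluster_idx := by
  intro idx_ls _
  unfold Spec_cluster_idx
  match idx_ls with
  | [] => simp [cluster_idx, cluster_idx_alt]
  | [x] =>
    simp [cluster_idx, cluster_alt_cons, clusterCont]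
  | x :: y :: rest =>
    have hlen : ¬ ((x :: y :: rest).length < 2) := by simp
    rw [cluster_alt_cons]
    simp only [cluster_idx, if_neg hlen]
    have := clusterLoopA_eq (y :: rest) [] [x] x
    simpa using this
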